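-- pv_equiv track=rewrite | github.com/RoelRotti/SudokuSATSolver | SAT.py | DLIS
-- ===== SOURCE A (Python) =====
-- from itertools import chain
-- from collections import Counter
--
-- def DLIS(cnf):
--     i=0
--     for sublijst in cnf:
--         if sublijst:
--             i+=1
--     if i!=0:
--         return Counter(chain.from_iterable(cnf)).most_common(1)[0][0]
--     else:
--         return None
-- ===== SOURCE B (Python) =====
-- def DLIS(cnf):
--     flat = [lit for clause in cnf for lit in clause]
--     best = None
--     best_count = 0
--     for i, lit in enumerate(flat):
--         if lit in flat[:i]:
--             continue  # not the first occurrence: already considered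
--         c = flat.count(lit)
--         if c > best_count:
--             best = lit
--             best_count = c
--     return best
-- ===== Notes on version B (the rewrite author's own statement) =====
-- stated objective: alternative
-- what changed: Drops the frequency table (Counter) and the non-empty-clause pass entirely: B flattens the CNF once and, scanning positions left to right, counts each literal by a direct list.count scan at its first occurrence only (prefix membership test), keeping the best under strict >, so the first-seen literal wins ties exactly as Counter.most_common(1) does and None falls out of the empty scan.
import Mathlib
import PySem

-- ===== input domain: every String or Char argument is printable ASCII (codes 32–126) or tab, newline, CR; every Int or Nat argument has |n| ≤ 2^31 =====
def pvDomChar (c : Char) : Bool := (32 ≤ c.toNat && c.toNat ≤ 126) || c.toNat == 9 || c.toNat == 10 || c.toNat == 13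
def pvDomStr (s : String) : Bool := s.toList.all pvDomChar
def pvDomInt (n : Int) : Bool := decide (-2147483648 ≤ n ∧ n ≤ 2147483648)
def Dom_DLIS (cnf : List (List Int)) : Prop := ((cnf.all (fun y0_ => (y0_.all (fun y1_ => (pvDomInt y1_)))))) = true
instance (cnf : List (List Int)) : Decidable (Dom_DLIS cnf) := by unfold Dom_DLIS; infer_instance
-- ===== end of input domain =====

-- B drops A's Counter frequency table and non-empty-clause pass: it flattens the CNF once and,
-- at each literal's FIRST occurrence, counts it by a direct list.count scan, keeping the best
-- under strict > (alternative algorithm, no table; quadratic instead of table-based).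

-- ===== PORT A =====
-- Counter(chain.from_iterable(cnf)) = PySem.Dict.counter cnf.flatten;
-- most_common(1)[0][0] = head of the items sorted by count, reverse=True (stable) — ported with
-- head?.map; the [0] index is exact here because in the branch where it is evaluated i ≠ 0, so the
-- counter is non-empty (proved below) and head? is some.
def DLIS (cnf : List (List Int)) : Option Int :=
  let i : Int := cnf.foldl (fun i sub => if sub ≠ [] then i + 1 else i) 0
  if i ≠ 0 then
    ((PySem.List.sorted (PySem.Dict.counter cnf.flatten).items (fun p => p.2) true).head?).map
      (fun p => p.1)
  else
    none

-- ===== PORT B =====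
-- flat[:i] = PySem.List.slice flat none (some i); lit in … = List.contains; flat.count = List.count.
def DLIS_alt (cnf : List (List Int)) : Option Int :=
  let flat : List Int := cnf.flatMap (fun clause => clause)
  ((PySem.List.enumerate flat 0).foldl
    (fun st p =>
      if (PySem.List.slice flat none (some p.1)).contains p.2 then st
      else
        let c : Int := (flat.count p.2 : Int)
        if c > st.2 then (some p.2, c) else st)
    ((none : Option Int), (0 : Int))).1

-- ===== PRECONDITION & SPEC =====
def Spec_DLIS (cnf : List (List Int)) (out : Option Int) : Prop := out = DLIS_alt cnf
instance (cnf : List (List Int)) (out : Option Int) : Decidable (Spec_DLIS cnf out) := by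
  unfold Spec_DLIS; infer_instance

-- ===== CLAIM (what is proved, stated in full; the proofs are below) =====
def Claim_equal_DLIS : Prop := ∀ (cnf : List (List Int)), Dom_DLIS cnf → Spec_DLIS cnf (DLIS cnf)

-- ===== LEMMAS AND PROOFS =====

-- head of Python's stable reverse sort by key = Python max(xs, key) (first maximal element)
theorem head_sorted_rev_eq_max? {α κ : Type} [LT κ] [DecidableLT κ]
    (xs : List α) (key : α → κ) :
    (PySem.List.sorted xs key true).head? = PySem.List.max? xs key := by
  rw [PySem.List.sorted_rev_eq_foldl_insertBy]
  show (List.foldl (fun acc x => PySem.List.insertBy (fun a b => decide (key b < key a)) x acc)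
      ([] : List α) xs).head? = _
  unfold PySem.List.max?
  suffices h : ∀ (acc : List α),
      (List.foldl (fun acc x => PySem.List.insertBy (fun a b => decide (key b < key a)) x acc)
        acc xs).head? =
      List.foldl (fun acc x => match acc with
        | none => some x
        | some m => if key m < key x then some x else some m) acc.head? xs from h []
  induction xs with
  | nil => intro acc; simp
  | cons x t ih =>
    intro acc
    simp only [List.foldl_cons]
    rw [ih]
    congr 1
    cases acc with
    | nil => simp [PySem.List.insertBy]
    | cons y ys =>
      simp only [PySem.List.insertBy, List.head?_cons]
      by_cases h : key y < key x
      · simp [h]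
      · simp [h]

theorem max?_cons_eq (x : Int × Int) (t : List (Int × Int)) :
    PySem.List.max? (x :: t) (fun p => p.2) =
      some (t.foldl (fun m y => if m.2 < y.2 then y else m) x) := by
  unfold PySem.List.max?
  simp only [List.foldl_cons]
  induction t generalizing x with
  | nil => rfl
  | cons y t ih =>
    simp only [List.foldl_cons]
    by_cases h : x.2 < y.2
    · simpa [h] using ih y
    · simpa [h] using ih x

theorem scan_some (t : List (Int × Int)) (q : Int × Int) :
    List.foldl (fun st p => if p.2 > st.2 then (some p.1, p.2) else st) (some q.1, q.2) t =
    (fun r : Int × Int => ((some r.1 : Option Int), r.2))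
      (List.foldl (fun m x => if m.2 < x.2 then x else m) q t) := by
  induction t generalizing q with
  | nil => rfl
  | cons x t ih =>
    simp only [List.foldl_cons]
    by_cases h : q.2 < x.2
    · simp only [gt_iff_lt, if_pos h]; exact ih x
    · simp only [gt_iff_lt, if_neg h]; exact ih q

-- the strict-> argmax scan started at (None, 0) computes max(items, key=count) when counts are > 0
theorem scan_eq_max? (xs : List (Int × Int)) (hpos : ∀ p ∈ xs, 0 < p.2) :
    (xs.foldl (fun st p => if p.2 > st.2 then (some p.1, p.2) else st)
      ((none : Option Int), (0 : Int))).1 =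
    (PySem.List.max? xs (fun p => p.2)).map (fun p => p.1) := by
  cases xs with
  | nil => rfl
  | cons x t =>
    have hx : (0 : Int) < x.2 := hpos x (by simp)
    rw [max?_cons_eq]
    show (List.foldl _ (if x.2 > (0:Int) then (some x.1, x.2) else (none, 0)) t).1 = _
    rw [if_pos (by exact_mod_cast hx)]
    rw [show ((some x.1, x.2) : Option Int × Int) = (some (x.1, x.2).1, (x.1, x.2).2) from rfl]
    rw [scan_some]
    rfl

-- every count in the counter's items is positive
theorem counter_items_pos (xs : List Int) :
    ∀ p ∈ (PySem.Dict.counter xs).items, 0 < p.2 := by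
  intro p hp
  rw [PySem.Dict.items_counter] at hp
  obtain ⟨k, hk, rfl⟩ := List.mem_map.mp hp
  have : k ∈ xs := (PySem.Set.mem_ofList xs k).mp hk
  simp only
  exact_mod_cast List.count_pos_iff.mpr this

-- A's clause-counting loop is zero exactly when every clause is empty (i.e. flatten = [])
theorem count_ne_zero_iff (cnf : List (List Int)) :
    (cnf.foldl (fun i sub => if sub ≠ [] then i + 1 else i) (0 : Int)) ≠ 0 ↔
      cnf.flatten ≠ [] := by
  rw [PySem.List.foldl_ite_add_one (fun sub => sub ≠ []) cnf 0, zero_add]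
  apply not_congr
  rw [Nat.cast_eq_zero, List.countP_eq_zero, List.flatten_eq_nil_iff]
  constructor
  · intro h l hl; simpa using h l hl
  · intro h l hl; simpa using h l hl

-- first occurrences of xs that are not already in `seen`, in order
def dedupWith {α : Type} [BEq α] (seen : List α) : List α → List α
  | [] => []
  | x :: t => if seen.contains x then dedupWith seen t
              else x :: dedupWith (seen ++ [x]) t

theorem dedupWith_congr {α : Type} [BEq α] [LawfulBEq α] (s s' : List α)
    (h : ∀ x, x ∈ s ↔ x ∈ s') : ∀ xs, dedupWith s xs = dedupWith s' xs := by
  intro xs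
  induction xs generalizing s s' with
  | nil => rfl
  | cons x t ih =>
    have hm : s.contains x = s'.contains x := by
      by_cases hx : x ∈ s'
      · have : x ∈ s := (h x).mpr hx
        simp [hx, this]
      · have : x ∉ s := fun hc => hx ((h x).mp hc)
        simp [hx, this]
    rw [dedupWith, dedupWith, hm]
    by_cases hx : s'.contains x
    · rw [if_pos hx, if_pos hx]; exact ih s s' h
    · rw [if_neg hx, if_neg hx]
      congr 1
      exact ih (s ++ [x]) (s' ++ [x]) (by intro y; simp [h y])

-- Set.update s xs appends exactly the elements dedupWith s xs
theorem update_eq_append_dedupWith {α : Type} [BEq α] [LawfulBEq α] (xs s : List α) :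
    PySem.Set.update s xs = s ++ dedupWith s xs := by
  induction xs generalizing s with
  | nil => simp [PySem.Set.update_nil, dedupWith]
  | cons x t ih =>
    rw [PySem.Set.update_cons, dedupWith]
    by_cases hx : s.contains x
    · have : PySem.Set.add s x = s := by
        simp only [PySem.Set.add, PySem.Set.contains]
        rw [if_pos hx]
      rw [this, if_pos hx, ih]
    · have : PySem.Set.add s x = s ++ [x] := by
        simp only [PySem.Set.add, PySem.Set.contains]
        rw [if_neg hx]
      rw [this, if_neg hx, ih, List.append_assoc]
      rfl

theorem ofList_eq_dedupWith {α : Type} [BEq α] [LawfulBEq α] (xs : List α) :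
    PySem.Set.ofList xs = dedupWith [] xs := by
  rw [← PySem.Set.update_nil_left, update_eq_append_dedupWith]
  rfl

-- B's enumerate loop with the prefix-membership guard folds g over the first occurrences
theorem foldl_enum_firstocc_aux {α β : Type} [BEq α] [LawfulBEq α]
    (g : β → α → β) (rest : List α) :
    ∀ (pre : List α) (init : β),
    (PySem.List.enumerate rest (pre.length : Int)).foldl
      (fun st p =>
        if (PySem.List.slice (pre ++ rest) none (some p.1)).contains p.2 then st
        else g st p.2) init
    = List.foldl g init (dedupWith pre rest) := by
  induction rest with
  | nil => intro pre init; simp [PySem.List.enumerate_nil, dedupWith]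
  | cons x t ih =>
    intro pre init
    rw [PySem.List.enumerate_cons, List.foldl_cons]
    have hslice : PySem.List.slice (pre ++ x :: t) none (some (pre.length : Int)) = pre := by
      rw [PySem.List.slice_to_natCast]
      simp
    have hlist : pre ++ x :: t = (pre ++ [x]) ++ t := by simp
    have hlen : (pre.length : Int) + 1 = ((pre ++ [x]).length : Int) := by
      simp [List.length_append]
    simp only [hslice]
    by_cases hx : pre.contains x
    · rw [if_pos hx]
      rw [hlist, hlen, ih (pre ++ [x]) init]
      have : dedupWith (pre ++ [x]) t = dedupWith pre t := by
        apply dedupWith_congr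
        intro y
        simp only [List.mem_append, List.mem_singleton]
        constructor
        · rintro (h | rfl)
          · exact h
          · simpa using hx
        · intro h; exact Or.inl h
      rw [this, dedupWith, if_pos hx]
    · rw [if_neg hx]
      rw [hlist, hlen, ih (pre ++ [x]) (g init x)]
      rw [dedupWith, if_neg hx, List.foldl_cons]

theorem foldl_enum_firstocc {α β : Type} [BEq α] [LawfulBEq α]
    (g : β → α → β) (xs : List α) (init : β) :
    (PySem.List.enumerate xs 0).foldl
      (fun st p =>
        if (PySem.List.slice xs none (some p.1)).contains p.2 then st
        else g st p.2) init
    = List.foldl g init (PySem.Set.ofList xs) := by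
  have := foldl_enum_firstocc_aux g xs [] init
  simpa [ofList_eq_dedupWith] using this

-- B's whole scan equals the strict-> argmax over Counter(flat).items
theorem alt_eq_scan_items (flat : List Int) :
    ((PySem.List.enumerate flat 0).foldl
      (fun st p =>
        if (PySem.List.slice flat none (some p.1)).contains p.2 then st
        else
          let c : Int := (flat.count p.2 : Int)
          if c > st.2 then (some p.2, c) else st)
      ((none : Option Int), (0 : Int))).1
    = ((PySem.Dict.counter flat).items.foldl
        (fun st p => if p.2 > st.2 then (some p.1, p.2) else st)
        ((none : Option Int), (0 : Int))).1 := by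
  rw [foldl_enum_firstocc
    (fun st x => if ((flat.count x : Int)) > st.2 then (some x, (flat.count x : Int)) else st)
    flat ((none : Option Int), (0 : Int))]
  rw [PySem.Dict.items_counter, List.foldl_map]

-- ===== VERDICT (by name: the statement is the Claim_ definition above) =====
theorem DLIS_spec : Claim_equal_DLIS := by
  intro cnf _
  unfold Spec_DLIS DLIS DLIS_alt
  simp only
  have hflatMap : cnf.flatMap (fun clause => clause) = cnf.flatten := by
    simp [List.flatMap_def]
  rw [hflatMap, alt_eq_scan_items]
  rw [scan_eq_max? _ (counter_items_pos cnf.flatten)]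
  by_cases h : (cnf.foldl (fun i sub => if sub ≠ [] then i + 1 else i) (0 : Int)) = 0
  · rw [if_neg (by simpa using h)]
    have hflat : cnf.flatten = [] := by
      by_contra hne
      exact (count_ne_zero_iff cnf).mpr hne h
    rw [hflat]
    decide
  · rw [if_pos h]
    rw [head_sorted_rev_eq_max?]
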